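-- pv_equiv track=rewrite | github.com/nramkissoon/Kanjidicparser | kanjidicparser.py | create_entries
-- ===== SOURCE A (Python) =====
-- def create_entries(data):
--     """ Creates a list of strings where each string contains all information about a specific kanji"""
--
--     ret_list = []
--     entry = ""
--     for line in data:
--         if line != "\n":
--             entry += line
--         else:
--             ret_list.append(entry)
--             entry = ""
--     return ret_list
-- ===== SOURCE B (Python) =====
-- def create_entries(data):
--     """ Creates a list of strings where each string contains all information about a specific kanji"""
--     lines = list(data)
--     groups = []
--     while "\n" in lines:
--         i = lines.index("\n")
--         groups.append("".join(lines[:i]))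
--         lines = lines[i + 1:]
--     return groups
-- ===== Notes on version B (the rewrite author's own statement) =====
-- stated objective: alternative
-- what changed: Instead of a single pass accumulating each entry character-wise with '+=' and flushing on blank lines, B repeatedly finds the first blank-line separator with index, joins the slice before it in one step, and recurses on the tail slice.
import Mathlib
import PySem

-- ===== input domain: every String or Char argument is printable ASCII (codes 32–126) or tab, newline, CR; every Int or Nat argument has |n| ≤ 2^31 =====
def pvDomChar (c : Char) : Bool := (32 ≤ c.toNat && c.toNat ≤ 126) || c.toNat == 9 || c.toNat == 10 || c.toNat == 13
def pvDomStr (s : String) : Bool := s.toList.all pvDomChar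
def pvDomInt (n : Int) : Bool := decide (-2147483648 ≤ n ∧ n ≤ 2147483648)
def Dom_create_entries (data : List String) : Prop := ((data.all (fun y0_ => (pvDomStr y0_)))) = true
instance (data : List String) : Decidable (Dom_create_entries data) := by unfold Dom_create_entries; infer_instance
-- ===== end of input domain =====

-- B groups the lines by repeatedly locating the first "\n" separator and joining the
-- slice before it, instead of A's single pass that accumulates each entry with '+='.

-- ===== PORT A =====
-- loop body of A: accumulate into entry, flush entry to ret_list on a blank line
def ceStep (st : List String × String) (line : String) : List String × String :=
  if line ≠ "\n" then (st.1, st.2 ++ line)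
  else (st.1 ++ [st.2], "")

def create_entries (data : List String) : List String :=
  (data.foldl ceStep ([], "")).1

-- ===== PORT B =====
-- B's while loop: 'while "\n" in lines: i = lines.index("\n"); …' — membership and
-- index are ported together as a match on PySem.List.index? (some i ↔ "\n" ∈ lines).
def ceAltLoop (lines : List String) (groups : List String) : List String :=
  match h : PySem.List.index? lines "\n" with
  | none => groups
  | some i =>
      ceAltLoop (PySem.List.slice lines (some ((i : Int) + 1)) none)
        (groups ++ [PySem.Str.join "" (PySem.List.slice lines none (some (i : Int)))])
termination_by lines.length
decreasing_by
  obtain ⟨hk, -, -⟩ := PySem.List.getElem_of_index?_eq_some h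
  have : PySem.List.slice lines (some ((i : Int) + 1)) none = lines.drop (i + 1) := by
    have := PySem.List.slice_from_natCast lines (i + 1)
    simpa using this
  rw [this]
  simp [List.length_drop]
  omega

def create_entries_alt (data : List String) : List String :=
  ceAltLoop data []

-- ===== PRECONDITION & SPEC =====
def Spec_create_entries (data : List String) (out : List String) : Prop := out = create_entries_alt data
instance (data : List String) (out : List String) : Decidable (Spec_create_entries data out) := by unfold Spec_create_entries; infer_instance

-- ===== CLAIM (what is proved, stated in full; the proofs are below) =====
def Claim_equal_create_entries : Prop := ∀ (data : List String), Dom_create_entries data → Spec_create_entries data (create_entries data)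

-- ===== LEMMAS AND PROOFS =====

-- reference recursion: the list of entries produced from lines, with entry accumulated so far
def ceChunks (entry : String) : List String → List String
  | [] => []
  | l :: ls => if l = "\n" then entry :: ceChunks "" ls else ceChunks (entry ++ l) ls

theorem ceFold_eq (lines : List String) (acc : List String) (entry : String) :
    (lines.foldl ceStep (acc, entry)).1 = acc ++ ceChunks entry lines := by
  induction lines generalizing acc entry with
  | nil => simp [ceChunks]
  | cons l ls ih =>
      by_cases hl : l = "\n"
      · simp [ceStep, hl, ceChunks, ih]
      · simp [ceStep, hl, ceChunks, ih]

theorem ceChunks_no_sep (entry : String) (lines : List String) (h : "\n" ∉ lines) :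
    ceChunks entry lines = [] := by
  induction lines generalizing entry with
  | nil => rfl
  | cons l ls ih =>
      simp only [List.mem_cons, not_or] at h
      have hp : l ≠ "\n" := fun e => h.1 e.symm
      simp [ceChunks, hp, ih _ h.2]

theorem str_join_cons (s : String) (parts : List String) :
    PySem.Str.join "" (s :: parts) = s ++ PySem.Str.join "" parts := by
  apply String.ext  -- equality on the underlying char lists
  cases parts with
  | nil => simp [PySem.Str.toList_join, PySem.Chars.join_singleton, PySem.Chars.join_nil]
  | cons t ts =>
      simp [PySem.Str.toList_join, PySem.Chars.join_cons_cons]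

theorem ceChunks_split (pre : List String) (entry : String) (suf : List String)
    (h : "\n" ∉ pre) :
    ceChunks entry (pre ++ "\n" :: suf)
      = (entry ++ PySem.Str.join "" pre) :: ceChunks "" suf := by
  induction pre generalizing entry with
  | nil =>
      have : PySem.Str.join "" ([] : List String) = "" := by
        apply String.ext; simp [PySem.Str.toList_join, PySem.Chars.join_nil]
      simp [ceChunks, this]
  | cons p ps ih =>
      simp only [List.mem_cons, not_or] at h
      have hp : p ≠ "\n" := fun e => h.1 e.symm
      simp only [List.cons_append, ceChunks, if_neg hp, ih _ h.2, str_join_cons]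
      rw [String.append_assoc]

theorem ceAltLoop_eq (lines : List String) (groups : List String) :
    ceAltLoop lines groups = groups ++ ceChunks "" lines := by
  fun_induction ceAltLoop lines groups with
  | case1 lines groups h =>
      rw [PySem.List.index?_eq_none_iff] at h
      simp [ceChunks_no_sep _ _ h]
  | case2 lines groups i h ih =>
      obtain ⟨pre, suf, rfl, rfl, hpre⟩ := (PySem.List.index?_eq_some_iff _ _ _).mp h
      have hto : PySem.List.slice (pre ++ "\n" :: suf) none (some ((pre.length : Nat) : Int)) = pre := by
        rw [PySem.List.slice_to_natCast]
        simp
      have hfrom : PySem.List.slice (pre ++ "\n" :: suf) (some ((pre.length : Int) + 1)) none = suf := by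
        have := PySem.List.slice_from_natCast (pre ++ "\n" :: suf) (pre.length + 1)
        push_cast at this
        rw [this]
        simp [List.drop_append]
      rw [hto, hfrom] at ih
      rw [hto, hfrom, ih, ceChunks_split pre "" suf hpre]
      have : ("" : String) ++ PySem.Str.join "" pre = PySem.Str.join "" pre := by
        apply String.ext; simp
      simp [this]

-- ===== VERDICT (by name: the statement is the Claim_ definition above) =====
theorem create_entries_spec : Claim_equal_create_entries := by
  intro data _
  unfold Spec_create_entries create_entries create_entries_alt
  rw [ceAltLoop_eq]
  simpa using ceFold_eq data [] ""
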